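-- pv_equiv track=rewrite | github.com/tykim9999/qmd | finetune/dataset/schema.py | output_items_to_text
-- ===== SOURCE A (Python) =====
-- from typing import Iterable
--
-- VALID_OUTPUT_TYPES = {"hyde", "lex", "vec"}
--
-- def reorder_hyde_first(items: list[list[str]]) -> list[list[str]]:
--     """Reorder items to put hyde first, then lex, then vec."""
--     hyde_items = [item for item in items if item and item[0] == "hyde"]
--     lex_items = [item for item in items if item and item[0] == "lex"]
--     vec_items = [item for item in items if item and item[0] == "vec"]
--     return hyde_items + lex_items + vec_items
--
-- def output_items_to_text(items: Iterable[Iterable[str]], hyde_first: bool = True) -> str: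
--     """Render output list pairs to prefixed text lines.
--
--     Args:
--         items: Iterable of [type, text] pairs
--         hyde_first: If True, reorder to put hyde first (default)
--     """
--     # First normalize to list
--     normalized = []
--     for item in items:
--         if not item:
--             continue
--         try:
--             kind, text = item[0], item[1]
--         except Exception:
--             continue
--         if kind not in VALID_OUTPUT_TYPES:
--             continue
--         if text is None:
--             continue
--         text = str(text).strip()
--         if not text:
--             continue
--         normalized.append([kind, text])
--
--     # Apply hyde-first ordering if requested
--     if hyde_first:
--         normalized = reorder_hyde_first(normalized)
--
--     lines = [f"{kind}: {text}" for kind, text in normalized]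
--     return "\n".join(lines)
-- ===== SOURCE B (Python) =====
-- def output_items_to_text(items, hyde_first=True):
--     """Single pass: normalize, format and bucket in one loop; no reorder helper."""
--     flat, hyde, lex, vec = [], [], [], []
--     for item in items:
--         if not item or len(item) < 2:
--             continue
--         kind, text = item[0], item[1]
--         if kind not in ("hyde", "lex", "vec") or text is None:
--             continue
--         text = str(text).strip()
--         if not text:
--             continue
--         line = f"{kind}: {text}"
--         flat.append(line)
--         (hyde if kind == "hyde" else lex if kind == "lex" else vec).append(line)
--     return "\n".join(hyde + lex + vec if hyde_first else flat)
-- ===== Notes on version B (the rewrite author's own statement) =====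
-- stated objective: simpler
-- what changed: Replaces A's normalize pass + three filter passes of reorder_hyde_first + a separate formatting pass with a single loop that validates, formats and buckets each line into hyde/lex/vec (and a flat list) as it goes, then concatenates the buckets.
import Mathlib
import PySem

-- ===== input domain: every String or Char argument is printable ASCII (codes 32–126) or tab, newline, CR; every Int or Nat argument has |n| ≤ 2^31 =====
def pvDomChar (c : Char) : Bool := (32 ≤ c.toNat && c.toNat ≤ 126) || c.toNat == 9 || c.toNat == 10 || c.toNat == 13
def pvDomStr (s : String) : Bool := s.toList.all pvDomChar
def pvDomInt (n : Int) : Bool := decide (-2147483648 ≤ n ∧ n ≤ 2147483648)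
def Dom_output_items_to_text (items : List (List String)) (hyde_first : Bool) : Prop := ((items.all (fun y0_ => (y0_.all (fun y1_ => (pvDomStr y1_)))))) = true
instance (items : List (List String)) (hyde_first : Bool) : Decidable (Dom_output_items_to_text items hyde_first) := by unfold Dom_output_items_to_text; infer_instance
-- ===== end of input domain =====

-- B normalizes, formats and buckets in ONE loop (no reorder helper, no format pass); objective: simpler/alternative, same cost.

-- ===== PORT A =====
-- VALID_OUTPUT_TYPES = {"hyde", "lex", "vec"}
def VALID_OUTPUT_TYPES : List String := ["hyde", "lex", "vec"]

-- 'item and item[0] == k' (on a list of strings: nonempty and head equals k)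
def pvIsKind (k : String) (it : List String) : Bool :=
  match it with
  | [] => false
  | k' :: _ => k' == k

def reorder_hyde_first (items : List (List String)) : List (List String) :=
  items.filter (pvIsKind "hyde") ++ items.filter (pvIsKind "lex") ++ items.filter (pvIsKind "vec")

-- one iteration of A's normalization loop ('continue' = return acc unchanged;
-- item[1] raising IndexError is the match on a too-short list)
def pvStepA (acc : List (List String)) (item : List String) : List (List String) :=
  match item with
  | [] => acc
  | [_] => acc
  | kind :: text :: _ =>
    if VALID_OUTPUT_TYPES.contains kind then
      let t := PySem.Str.strip text
      if t = "" then acc else acc ++ [[kind, t]]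
    else acc

-- f"{kind}: {text}" over a [kind, text] pair (normalized entries always have exactly two fields)
def pvFmt (p : List String) : String :=
  match p with
  | [kind, text] => kind ++ ": " ++ text
  | _ => ""

def output_items_to_text (items : List (List String)) (hyde_first : Bool) : String :=
  let normalized := items.foldl pvStepA []
  let normalized := if hyde_first then reorder_hyde_first normalized else normalized
  PySem.Str.join "\n" (normalized.map pvFmt)

-- ===== PORT B =====
-- state = (flat, hyde, lex, vec), all lists of already-formatted lines
def pvStepB (st : List String × List String × List String × List String)
    (item : List String) : List String × List String × List String × List String :=
  match item with
  | kind :: text :: _ =>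
    if kind == "hyde" || kind == "lex" || kind == "vec" then
      let t := PySem.Str.strip text
      if t = "" then st
      else
        let line := kind ++ ": " ++ t
        let (flat, h, l, v) := st
        if kind == "hyde" then (flat ++ [line], h ++ [line], l, v)
        else if kind == "lex" then (flat ++ [line], h, l ++ [line], v)
        else (flat ++ [line], h, l, v ++ [line])
    else st
  | _ => st

def output_items_to_text_alt (items : List (List String)) (hyde_first : Bool) : String :=
  match items.foldl pvStepB ([], [], [], []) with
  | (flat, h, l, v) =>
    PySem.Str.join "\n" (if hyde_first then h ++ l ++ v else flat)

-- ===== PRECONDITION & SPEC =====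
def Spec_output_items_to_text (items : List (List String)) (hyde_first : Bool) (out : String) : Prop := out = output_items_to_text_alt items hyde_first
instance (items : List (List String)) (hyde_first : Bool) (out : String) : Decidable (Spec_output_items_to_text items hyde_first out) := by unfold Spec_output_items_to_text; infer_instance

-- ===== CLAIM (what is proved, stated in full; the proofs are below) =====
def Claim_equal_output_items_to_text : Prop := ∀ (items : List (List String)) (hyde_first : Bool), Dom_output_items_to_text items hyde_first → Spec_output_items_to_text items hyde_first (output_items_to_text items hyde_first)

-- ===== LEMMAS AND PROOFS =====

-- B's fold state is exactly (map, and the three kind-filters mapped) of A's accumulator.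
lemma pv_fold_inv (items : List (List String)) :
    ∀ acc : List (List String),
      items.foldl pvStepB
        (acc.map pvFmt,
         (acc.filter (pvIsKind "hyde")).map pvFmt,
         (acc.filter (pvIsKind "lex")).map pvFmt,
         (acc.filter (pvIsKind "vec")).map pvFmt) =
      ((items.foldl pvStepA acc).map pvFmt,
       ((items.foldl pvStepA acc).filter (pvIsKind "hyde")).map pvFmt,
       ((items.foldl pvStepA acc).filter (pvIsKind "lex")).map pvFmt,
       ((items.foldl pvStepA acc).filter (pvIsKind "vec")).map pvFmt) := by
  induction items with
  | nil => intro acc; rfl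
  | cons item rest ih =>
    intro acc
    have hstep : pvStepB
        (acc.map pvFmt,
         (acc.filter (pvIsKind "hyde")).map pvFmt,
         (acc.filter (pvIsKind "lex")).map pvFmt,
         (acc.filter (pvIsKind "vec")).map pvFmt) item =
        ((pvStepA acc item).map pvFmt,
         ((pvStepA acc item).filter (pvIsKind "hyde")).map pvFmt,
         ((pvStepA acc item).filter (pvIsKind "lex")).map pvFmt,
         ((pvStepA acc item).filter (pvIsKind "vec")).map pvFmt) := by
      match item with
      | [] => rfl
      | [_] => rfl
      | kind :: text :: restTail =>
        by_cases hv : kind = "hyde" ∨ kind = "lex" ∨ kind = "vec"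
        · rcases hv with h | h | h <;> subst h <;>
            simp [pvStepA, pvStepB, VALID_OUTPUT_TYPES] <;>
            split <;> simp [pvIsKind, pvFmt]
        · push Not at hv
          simp [pvStepA, pvStepB, VALID_OUTPUT_TYPES, hv.1, hv.2.1, hv.2.2]
    simp only [List.foldl_cons, hstep, ih]

theorem output_items_to_text_spec : Claim_equal_output_items_to_text := by
  intro items hyde_first _
  unfold Spec_output_items_to_text output_items_to_text output_items_to_text_alt
  have h := pv_fold_inv items []
  simp only [List.map_nil, List.filter_nil] at h
  rw [h]
  cases hyde_first with
  | false => simp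
  | true => simp [reorder_hyde_first]
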